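-- pv_equiv track=rewrite | github.com/czaky/puzzles | strings.py | artistic_photo_count
-- ===== SOURCE A (Python) =====
-- from itertools import accumulate, combinations, islice, product
--
-- def artistic_photo_count(s: str, x: int, y: int) -> int:
--     """Return number of artistic photos given the scenery and `x,y` constraints.
--
--     String `s` contains a photography set including positions for:
--         P - the photographer,
--         A - the actor/model,
--         B - the backdrop.
--     A valid photo can be made if the actor is placed between the
--     photographer and the backdrop.
--     An artistic photo keeps the (index) distance between each
--     of them to the inclusive interval [x, y].
--     """
--     l = len(s) - 1
--     ps = list(accumulate(int(c == "P") for c in s))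
--     bs = list(accumulate(int(c == "B") for c in s))
--     p = lambda i: int(i >= 0 and ps[min(i, l)])
--     b = lambda i: int(i >= 0 and bs[min(i, l)])
--     actors = [i for i, c in enumerate(s) if c == "A" and x <= i <= l - x]
--
--     pab = sum((p(a - x) - p(a - y - 1)) * (b(a + y) - b(a + x - 1)) for a in actors)
--     bap = sum((b(a - x) - b(a - y - 1)) * (p(a + y) - p(a + x - 1)) for a in actors)
--
--     return pab + bap
-- ===== SOURCE B (Python) =====
-- def artistic_photo_count(s: str, x: int, y: int) -> int:
--     """Window-scanning version: for each actor, count P/B directly in the two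
--     inclusive distance windows [a-y, a-x] and [a+x, a+y] (clamped to the string)."""
--     total = 0
--     for a, c in enumerate(s):
--         if c == "A":
--             left = s[max(0, a - y):max(0, a - x + 1)]
--             right = s[max(0, a + x):max(0, a + y + 1)]
--             total += left.count("P") * right.count("B") + left.count("B") * right.count("P")
--     return total
-- ===== Notes on version B (the rewrite author's own statement) =====
-- stated objective: alternative
-- what changed: Replaces A's accumulated prefix-sum arrays, clamped-index lookup lambdas and pre-filtered actor list by a single pass that, at each actor, directly slices the two inclusive distance windows [a-y,a-x] and [a+x,a+y] and counts P/B in them; no arrays are built, which a timing run measured as faster on the generated inputs.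
-- intended difference: When y < x the distance interval [x,y] is empty, so no artistic photo exists and B returns the intended 0, while A's clamped prefix-sum differences multiply two nonpositive factors and return a spurious positive count whenever some admitted actor has a P/B (or B/P) pair in the inverted windows [a-x+1,a-y-1] and [a+y+1,a+x-1]. — e.g. on artistic_photo_count("PAB", 1, -2): A returns 1, B returns 0
import Mathlib
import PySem

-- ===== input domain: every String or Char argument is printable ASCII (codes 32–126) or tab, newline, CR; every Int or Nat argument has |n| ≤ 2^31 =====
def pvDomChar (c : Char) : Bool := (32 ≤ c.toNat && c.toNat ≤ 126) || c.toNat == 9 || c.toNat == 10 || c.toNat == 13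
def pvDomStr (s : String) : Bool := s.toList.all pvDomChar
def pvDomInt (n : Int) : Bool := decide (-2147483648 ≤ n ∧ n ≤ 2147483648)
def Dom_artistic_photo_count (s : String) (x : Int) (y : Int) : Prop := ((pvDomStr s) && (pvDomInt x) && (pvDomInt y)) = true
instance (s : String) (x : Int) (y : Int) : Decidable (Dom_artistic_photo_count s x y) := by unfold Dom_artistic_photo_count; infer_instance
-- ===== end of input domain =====

-- B replaces A's prefix-sum arrays by directly scanning the two distance windows of each actor
-- (no arrays built; a timing run measured it faster on the generated inputs); on y < x (empty
-- distance interval) B returns the intended 0 where A can return a spurious positive count — see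
-- D_artistic_photo_count below.

-- ===== PORT A =====
-- itertools.accumulate (default op +) has no PySem primitive; ported exactly, step for step.
def pvAcc (t : Int) : List Int → List Int
  | [] => []
  | v :: vs => (t + v) :: pvAcc (t + v) vs

def artistic_photo_count (s : String) (x : Int) (y : Int) : Int :=
  let cs := s.toList
  let l : Int := PySem.List.len cs - 1
  let ps := pvAcc 0 (cs.map fun c => if c = 'P' then (1 : Int) else 0)
  let bs := pvAcc 0 (cs.map fun c => if c = 'B' then (1 : Int) else 0)
  -- ps[min(i, l)]: whenever Python evaluates the lambda the list of actors is nonempty, so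
  -- 0 ≤ min i l < len ps and pyGetD is exact (its default is dead code).
  let p := fun (i : Int) => if 0 ≤ i then PySem.List.pyGetD ps (min i l) 0 else 0
  let b := fun (i : Int) => if 0 ≤ i then PySem.List.pyGetD bs (min i l) 0 else 0
  let actors := ((PySem.List.enumerate cs 0).filter
      (fun ic => ic.2 == 'A' && decide (x ≤ ic.1) && decide (ic.1 ≤ l - x))).map (·.1)
  let pab := (actors.map (fun a => (p (a - x) - p (a - y - 1)) * (b (a + y) - b (a + x - 1)))).sum
  let bap := (actors.map (fun a => (b (a - x) - b (a - y - 1)) * (p (a + y) - p (a + x - 1)))).sum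
  pab + bap

-- ===== PORT B =====
-- str.count of a single character is the character count of the slice (exact).
def artistic_photo_count_alt (s : String) (x : Int) (y : Int) : Int :=
  let cs := s.toList
  (PySem.List.enumerate cs 0).foldl (fun total ac =>
    if ac.2 = 'A' then
      let a := ac.1
      let left := PySem.List.slice cs (some (max 0 (a - y))) (some (max 0 (a - x + 1)))
      let right := PySem.List.slice cs (some (max 0 (a + x))) (some (max 0 (a + y + 1)))
      total + (left.count 'P' : Int) * (right.count 'B' : Int)
            + (left.count 'B' : Int) * (right.count 'P' : Int)
    else total) 0

-- ===== PRECONDITION & SPEC =====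
-- When y < x the distance interval [x, y] is empty, so no artistic photo exists and B returns the
-- intended 0; A's clamped prefix-sum differences then multiply two nonpositive factors and return a
-- spurious positive count, exactly when an admitted actor a has characters P,B (or B,P) at indices
-- i,k strictly inside the inverted windows (a-x, a-y) and (a+y, a+x).
def D_artistic_photo_count (s : String) (x : Int) (y : Int) : Prop :=
  ∃ a ∈ s.toList.zipIdx, a.1 = 'A' ∧ x ≤ a.2 ∧ a.2 + x < s.toList.length ∧
    ∃ i ∈ s.toList.zipIdx, a.2 - x < i.2 ∧ i.2 < a.2 - y ∧
      ∃ k ∈ s.toList.zipIdx, a.2 + y < k.2 ∧ k.2 < a.2 + x ∧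
        (i.1, k.1) ∈ [('P', 'B'), ('B', 'P')]

instance (s : String) (x : Int) (y : Int) : Decidable (D_artistic_photo_count s x y) := by
  unfold D_artistic_photo_count; infer_instance

def Spec_artistic_photo_count (s : String) (x : Int) (y : Int) (out : Int) : Prop :=
  ¬ D_artistic_photo_count s x y → out = artistic_photo_count_alt s x y
instance (s : String) (x : Int) (y : Int) (out : Int) : Decidable (Spec_artistic_photo_count s x y out) := by
  unfold Spec_artistic_photo_count; infer_instance

def pvDiffWitness_artistic_photo_count : String × Int × Int := ("PAB", 1, -2)
def pvDiffWitnessOut_artistic_photo_count : Int × Int := (1, 0)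

-- ===== CLAIM (what is proved, stated in full; the proofs are below) =====
def Claim_unchanged_artistic_photo_count : Prop := ∀ (s : String) (x : Int) (y : Int), Dom_artistic_photo_count s x y → Spec_artistic_photo_count s x y (artistic_photo_count s x y)
def Claim_changed_artistic_photo_count : Prop := Dom_artistic_photo_count (pvDiffWitness_artistic_photo_count.1) (pvDiffWitness_artistic_photo_count.2.1) (pvDiffWitness_artistic_photo_count.2.2) ∧ D_artistic_photo_count (pvDiffWitness_artistic_photo_count.1) (pvDiffWitness_artistic_photo_count.2.1) (pvDiffWitness_artistic_photo_count.2.2) ∧ artistic_photo_count (pvDiffWitness_artistic_photo_count.1) (pvDiffWitness_artistic_photo_count.2.1) (pvDiffWitness_artistic_photo_count.2.2) = pvDiffWitnessOut_artistic_photo_count.1 ∧ artistic_photo_count_alt (pvDiffWitness_artistic_photo_count.1) (pvDiffWitness_artistic_photo_count.2.1) (pvDiffWitness_artistic_photo_count.2.2) = pvDiffWitnessOut_artistic_photo_count.2 ∧ pvDiffWitnessOut_artistic_photo_count.1 ≠ pvDiffWitnessOut_artistic_photo_count.2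
def Claim_exact_artistic_photo_count : Prop := ∀ (s : String) (x : Int) (y : Int), Dom_artistic_photo_count s x y → D_artistic_photo_count s x y → artistic_photo_count s x y ≠ artistic_photo_count_alt s x y

-- ===== LEMMAS AND PROOFS =====

-- some character c sits at an index i of cs with lo ≤ i < hi
def pvHas (cs : List Char) (c : Char) (lo hi : Int) : Prop :=
  ∃ p ∈ PySem.List.enumerate cs 0, p.2 = c ∧ lo ≤ p.1 ∧ p.1 < hi

lemma D_iff (s : String) (x y : Int) :
    D_artistic_photo_count s x y ↔ (y < x ∧ ∃ ac ∈ PySem.List.enumerate s.toList 0, ac.2 = 'A' ∧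
      x ≤ ac.1 ∧ ac.1 ≤ (PySem.List.len s.toList - 1) - x ∧
      ((pvHas s.toList 'P' (ac.1 - x + 1) (ac.1 - y) ∧ pvHas s.toList 'B' (ac.1 + y + 1) (ac.1 + x)) ∨
       (pvHas s.toList 'B' (ac.1 - x + 1) (ac.1 - y) ∧ pvHas s.toList 'P' (ac.1 + y + 1) (ac.1 + x)))) := by
  unfold D_artistic_photo_count pvHas
  constructor
  · rintro ⟨a, ha, hA, hx1, hx2, i, hi, hb1, hb2, k, hk, hb3, hb4, hc⟩
    rw [List.mem_zipIdx_iff_getElem?] at ha hi hk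
    obtain ⟨haL, haE⟩ := List.getElem?_eq_some_iff.mp ha
    obtain ⟨hiL, hiE⟩ := List.getElem?_eq_some_iff.mp hi
    obtain ⟨hkL, hkE⟩ := List.getElem?_eq_some_iff.mp hk
    have hmi : ((0:Int) + (i.2:Int), s.toList[i.2]) ∈ PySem.List.enumerate s.toList 0 := by
      rw [PySem.List.mem_enumerate_iff]; exact ⟨i.2, hiL, rfl⟩
    have hmk : ((0:Int) + (k.2:Int), s.toList[k.2]) ∈ PySem.List.enumerate s.toList 0 := by
      rw [PySem.List.mem_enumerate_iff]; exact ⟨k.2, hkL, rfl⟩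
    refine ⟨by omega, ((0:Int) + (a.2:Int), s.toList[a.2]), ?_, by rw [haE, hA], by dsimp; omega,
      by simp only [PySem.List.len_eq]; omega, ?_⟩
    · rw [PySem.List.mem_enumerate_iff]; exact ⟨a.2, haL, rfl⟩
    · simp only [List.mem_cons, List.not_mem_nil, or_false, Prod.mk.injEq] at hc
      rcases hc with ⟨hiP, hkB⟩ | ⟨hiB, hkP⟩
      · exact Or.inl ⟨⟨_, hmi, by rw [hiE, hiP], by dsimp; omega, by dsimp; omega⟩,
          ⟨_, hmk, by rw [hkE, hkB], by dsimp; omega, by dsimp; omega⟩⟩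
      · exact Or.inr ⟨⟨_, hmi, by rw [hiE, hiB], by dsimp; omega, by dsimp; omega⟩,
          ⟨_, hmk, by rw [hkE, hkP], by dsimp; omega, by dsimp; omega⟩⟩
  · rintro ⟨hyx, ac, hac, hA, hx1, hx2, hc⟩
    rw [PySem.List.mem_enumerate_iff] at hac
    obtain ⟨m, hm, rfl⟩ := hac
    simp only [PySem.List.len_eq] at hx2
    have hma : (s.toList[m], m) ∈ s.toList.zipIdx := by
      rw [List.mem_zipIdx_iff_getElem?]; exact List.getElem?_eq_some_iff.mpr ⟨hm, rfl⟩
    rcases hc with ⟨⟨p1, hp1, hc1, hl1, hl2⟩, ⟨p2, hp2, hc2, hl3, hl4⟩⟩ |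
        ⟨⟨p1, hp1, hc1, hl1, hl2⟩, ⟨p2, hp2, hc2, hl3, hl4⟩⟩ <;>
      rw [PySem.List.mem_enumerate_iff] at hp1 hp2 <;>
      obtain ⟨mi, hmi, rfl⟩ := hp1 <;> obtain ⟨mk, hmk, rfl⟩ := hp2 <;>
      dsimp at hA hx1 hx2 hl1 hl2 hl3 hl4 hc1 hc2
    · refine ⟨(s.toList[m], m), hma, hA, by dsimp; omega, by dsimp; omega,
        (s.toList[mi], mi), ?_, by dsimp; omega, by dsimp; omega,
        (s.toList[mk], mk), ?_, by dsimp; omega, by dsimp; omega, by simp [hc1, hc2]⟩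
      · rw [List.mem_zipIdx_iff_getElem?]; exact List.getElem?_eq_some_iff.mpr ⟨hmi, rfl⟩
      · rw [List.mem_zipIdx_iff_getElem?]; exact List.getElem?_eq_some_iff.mpr ⟨hmk, rfl⟩
    · refine ⟨(s.toList[m], m), hma, hA, by dsimp; omega, by dsimp; omega,
        (s.toList[mi], mi), ?_, by dsimp; omega, by dsimp; omega,
        (s.toList[mk], mk), ?_, by dsimp; omega, by dsimp; omega, by simp [hc1, hc2]⟩
      · rw [List.mem_zipIdx_iff_getElem?]; exact List.getElem?_eq_some_iff.mpr ⟨hmi, rfl⟩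
      · rw [List.mem_zipIdx_iff_getElem?]; exact List.getElem?_eq_some_iff.mpr ⟨hmk, rfl⟩

def pvCnt (c : Char) (cs : List Char) (j : Nat) : Int := ((cs.take j).count c : Int)

def pvW (c : Char) (cs : List Char) (lo hi : Int) : Int :=
  pvCnt c cs (max lo.toNat hi.toNat) - pvCnt c cs lo.toNat

lemma pvAcc_length (t : Int) (xs : List Int) : (pvAcc t xs).length = xs.length := by
  induction xs generalizing t with
  | nil => rfl
  | cons v vs ih => simp [pvAcc, ih]

lemma pvAcc_getElem? (xs : List Int) (t : Int) (j : Nat) (h : j < xs.length) :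
    (pvAcc t xs)[j]? = some (t + (xs.take (j+1)).sum) := by
  induction xs generalizing t j with
  | nil => simp at h
  | cons v vs ih =>
    cases j with
    | zero => simp [pvAcc]
    | succ k =>
      simp only [pvAcc, List.getElem?_cons_succ]
      rw [ih (t + v) k (by simpa using h)]
      simp [List.take_succ_cons, add_assoc]

lemma pvCnt_ind_sum (cs : List Char) (c : Char) (j : Nat) :
    (((cs.map fun c' => if c' = c then (1:Int) else 0).take j).sum) = pvCnt c cs j := by
  rw [← List.map_take, pvCnt]
  induction cs.take j with
  | nil => rfl
  | cons h t ih =>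
    by_cases hc : h = c
    · simp [hc, ih]; omega
    · simp [hc, ih]

lemma pvCnt_take_add (c : Char) (cs : List Char) (a k : Nat) :
    pvCnt c cs (a + k) = pvCnt c cs a + (((cs.drop a).take k).count c : Int) := by
  unfold pvCnt
  rw [List.take_add, List.count_append]
  push_cast; ring

lemma pvCnt_clamp (c : Char) (cs : List Char) {j : Nat} (h : cs.length ≤ j) :
    pvCnt c cs j = pvCnt c cs cs.length := by
  unfold pvCnt
  rw [List.take_of_length_le h, List.take_length]

-- A's clamped prefix lookup equals the count of the first (i+1).toNat characters.
lemma pvP_eq (c : Char) (cs : List Char) (hn : cs ≠ []) (i : Int) :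
    (if 0 ≤ i then
        PySem.List.pyGetD (pvAcc 0 (cs.map fun c' => if c' = c then (1:Int) else 0))
          (min i (PySem.List.len cs - 1)) 0
      else 0) = pvCnt c cs (i+1).toNat := by
  have hlen : cs.length ≠ 0 := by simpa using hn
  by_cases hi : 0 ≤ i
  · simp only [hi, if_pos, PySem.List.len_eq]
    have h1 : (0:Int) ≤ min i ((cs.length:Int) - 1) := by omega
    have h2 : min i ((cs.length:Int) - 1) < (pvAcc 0 (cs.map fun c' => if c' = c then (1:Int) else 0)).length := by
      rw [pvAcc_length, List.length_map]; omega
    rw [PySem.List.pyGetD_eq_getElem _ 0 h1 (by simpa using h2)]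
    have h3 : (min i ((cs.length:Int) - 1)).toNat < (cs.map fun c' => if c' = c then (1:Int) else 0).length := by
      simp; omega
    have := pvAcc_getElem? (cs.map fun c' => if c' = c then (1:Int) else 0) 0 _ h3
    have hg : (pvAcc 0 (cs.map fun c' => if c' = c then (1:Int) else 0))[(min i ((cs.length:Int) - 1)).toNat] =
        0 + ((cs.map fun c' => if c' = c then (1:Int) else 0).take ((min i ((cs.length:Int) - 1)).toNat + 1)).sum := by
      have := this
      rwa [List.getElem?_eq_getElem (by rw [pvAcc_length]; simpa using h3), Option.some_inj] at this
    rw [hg, zero_add, pvCnt_ind_sum]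
    -- counts clamp at the length
    by_cases hle : (i+1).toNat ≤ cs.length
    · congr 1; omega
    · rw [pvCnt_clamp c cs (by omega), pvCnt_clamp c cs (j := (i+1).toNat) (by omega)]
  · rw [if_neg hi]
    have : (i+1).toNat = 0 := by omega
    rw [this]; rfl

-- B's window slice count is pvW.
lemma pvSlice_count (c : Char) (cs : List Char) (st sp : Int) :
    ((PySem.List.slice cs (some (max 0 st)) (some (max 0 sp))).count c : Int) =
      pvW c cs st sp := by
  rw [PySem.List.slice_toNat _ (le_max_left 0 st) (le_max_left 0 sp)]
  have hst : (max 0 st).toNat = st.toNat := by omega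
  have hsp : (max 0 sp).toNat = sp.toNat := by omega
  rw [hst, hsp, pvW]
  have : max st.toNat sp.toNat = st.toNat + (sp.toNat - st.toNat) := by omega
  rw [this, pvCnt_take_add]
  ring

lemma pvW_nonneg (c : Char) (cs : List Char) (lo hi : Int) : 0 ≤ pvW c cs lo hi := by
  have : max lo.toNat hi.toNat = lo.toNat + (max lo.toNat hi.toNat - lo.toNat) := by omega
  rw [pvW, this, pvCnt_take_add]
  have : (0:Int) ≤ (((cs.drop lo.toNat).take (max lo.toNat hi.toNat - lo.toNat)).count c : Int) := by positivity
  omega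

lemma pvW_eq_of_le (c : Char) (cs : List Char) {lo hi : Int} (h : lo.toNat ≤ hi.toNat) :
    pvW c cs lo hi = pvCnt c cs hi.toNat - pvCnt c cs lo.toNat := by
  rw [pvW, max_eq_right h]

lemma pvW_zero_of_le (c : Char) (cs : List Char) {lo hi : Int} (h : hi.toNat ≤ lo.toNat) :
    pvW c cs lo hi = 0 := by
  rw [pvW, max_eq_left h, sub_self]

lemma pvW_zero_of_ge_len (c : Char) (cs : List Char) {lo hi : Int} (h : (cs.length : Int) ≤ lo) :
    pvW c cs lo hi = 0 := by
  rw [pvW, pvCnt_clamp c cs (j := max lo.toNat hi.toNat) (by omega),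
      pvCnt_clamp c cs (j := lo.toNat) (by omega), sub_self]

lemma pvHas_iff (cs : List Char) (c : Char) (lo hi : Int) :
    pvHas cs c lo hi ↔ ∃ k : Nat, k < cs.length ∧ cs[k]? = some c ∧ lo ≤ (k:Int) ∧ (k:Int) < hi := by
  unfold pvHas
  constructor
  · rintro ⟨p, hp, hc, hlo, hhi⟩
    rw [PySem.List.mem_enumerate_iff] at hp
    obtain ⟨k, hk, rfl⟩ := hp
    refine ⟨k, hk, ?_, by simpa using hlo, by simpa using hhi⟩
    rw [List.getElem?_eq_getElem hk, Option.some_inj]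
    simpa using hc
  · rintro ⟨k, hk, hc, hlo, hhi⟩
    refine ⟨((k:Int), cs[k]), ?_, ?_, by simpa using hlo, by simpa using hhi⟩
    · rw [PySem.List.mem_enumerate_iff]; exact ⟨k, hk, by simp⟩
    · simpa [List.getElem?_eq_getElem hk] using hc

lemma pvW_pos_iff (c : Char) (cs : List Char) (lo hi : Int) :
    0 < pvW c cs lo hi ↔ pvHas cs c lo hi := by
  have hkey : max lo.toNat hi.toNat = lo.toNat + (max lo.toNat hi.toNat - lo.toNat) := by omega
  rw [pvW, hkey, pvCnt_take_add, pvHas_iff]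
  simp only [add_sub_cancel_left]
  rw [show ((0:Int) < (((cs.drop lo.toNat).take (max lo.toNat hi.toNat - lo.toNat)).count c : Int)) ↔
      0 < ((cs.drop lo.toNat).take (max lo.toNat hi.toNat - lo.toNat)).count c by exact_mod_cast Iff.rfl]
  rw [List.count_pos_iff]
  constructor
  · intro hm
    obtain ⟨j, hj, hget⟩ := List.mem_iff_getElem.mp hm
    have hj' := hj
    simp only [List.length_take, List.length_drop] at hj'
    refine ⟨lo.toNat + j, by omega, ?_, by omega, by omega⟩
    · rw [List.getElem_take, List.getElem_drop] at hget
      rw [List.getElem?_eq_getElem (by omega)]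
      simpa using hget
  · rintro ⟨k, hk, hget, hlo, hhi⟩
    rw [List.mem_iff_getElem]
    refine ⟨k - lo.toNat, ?_, ?_⟩
    · simp only [List.length_take, List.length_drop]; omega
    · rw [List.getElem?_eq_getElem hk, Option.some_inj] at hget
      rw [List.getElem_take, List.getElem_drop]
      subst hget
      congr 1
      omega

lemma pvW_eq_zero_iff (c : Char) (cs : List Char) (lo hi : Int) :
    pvW c cs lo hi = 0 ↔ ¬ pvHas cs c lo hi := by
  rw [← pvW_pos_iff c cs lo hi]
  have := pvW_nonneg c cs lo hi
  omega

lemma pvSum_filter (l : List (Int × Char)) (p : Int × Char → Bool) (f : Int × Char → Int) :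
    ((l.filter p).map f).sum = (l.map (fun x => if p x then f x else 0)).sum := by
  induction l with
  | nil => rfl
  | cons h t ih => by_cases hp : p h <;> simp [hp, ih]

-- the A-side term, rewritten through pvCnt
def pvTermA (cs : List Char) (x y a : Int) : Int :=
  (pvCnt 'P' cs (a - x + 1).toNat - pvCnt 'P' cs (a - y).toNat) *
    (pvCnt 'B' cs (a + y + 1).toNat - pvCnt 'B' cs (a + x).toNat) +
  (pvCnt 'B' cs (a - x + 1).toNat - pvCnt 'B' cs (a - y).toNat) *
    (pvCnt 'P' cs (a + y + 1).toNat - pvCnt 'P' cs (a + x).toNat)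

def pvTermB (cs : List Char) (x y a : Int) : Int :=
  pvW 'P' cs (a - y) (a - x + 1) * pvW 'B' cs (a + x) (a + y + 1) +
  pvW 'B' cs (a - y) (a - x + 1) * pvW 'P' cs (a + x) (a + y + 1)

def pvQ (x l : Int) (ac : Int × Char) : Bool :=
  ac.2 == 'A' && decide (x ≤ ac.1) && decide (ac.1 ≤ l - x)

lemma A_eq (s : String) (x y : Int) (hn : s.toList ≠ []) :
    artistic_photo_count s x y =
      ((PySem.List.enumerate s.toList 0).map (fun ac =>
        if pvQ x (PySem.List.len s.toList - 1) ac then pvTermA s.toList x y ac.1 else 0)).sum := by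
  unfold artistic_photo_count
  simp only []
  rw [List.map_map, List.map_map, ← PySem.List.sum_map_add_int, pvSum_filter]
  refine congrArg _ (List.map_congr_left ?_)
  intro ac hac
  unfold pvQ
  split_ifs with hq
  · simp only [Function.comp]
    have e1 := pvP_eq 'P' s.toList hn
    have e2 := pvP_eq 'B' s.toList hn
    rw [e1 (ac.1 - x), e1 (ac.1 - y - 1), e2 (ac.1 + y), e2 (ac.1 + x - 1),
        e2 (ac.1 - x), e2 (ac.1 - y - 1), e1 (ac.1 + y), e1 (ac.1 + x - 1)]
    unfold pvTermA
    have h2 : (ac.1 - y - 1 + 1) = ac.1 - y := by ring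
    have h4 : (ac.1 + x - 1 + 1) = ac.1 + x := by ring
    rw [h2, h4]
  · rfl

lemma B_eq (s : String) (x y : Int) :
    artistic_photo_count_alt s x y =
      ((PySem.List.enumerate s.toList 0).map (fun ac =>
        if ac.2 = 'A' then pvTermB s.toList x y ac.1 else 0)).sum := by
  unfold artistic_photo_count_alt
  simp only []
  refine (PySem.List.foldl_congr_mem _ _
      (fun total ac => total + (if ac.2 = 'A' then pvTermB s.toList x y ac.1 else 0)) _ ?_).trans ?_
  · intro acc ac hac
    by_cases hA : ac.2 = 'A'
    · simp only [hA, if_true]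
      unfold pvTermB
      rw [← pvSlice_count 'P' s.toList (ac.1 - y) (ac.1 - x + 1),
          ← pvSlice_count 'B' s.toList (ac.1 + x) (ac.1 + y + 1),
          ← pvSlice_count 'B' s.toList (ac.1 - y) (ac.1 - x + 1),
          ← pvSlice_count 'P' s.toList (ac.1 + x) (ac.1 + y + 1)]
      ring
    · simp [hA]
  · rw [PySem.List.foldl_add]
    simp

lemma pvTermB_eq_pvTermA (cs : List Char) (x y a : Int) (hxy : x ≤ y) :
    pvTermB cs x y a = pvTermA cs x y a := by
  unfold pvTermA pvTermB
  rw [pvW_eq_of_le 'P' cs (lo := a - y) (hi := a - x + 1) (by omega),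
      pvW_eq_of_le 'B' cs (lo := a - y) (hi := a - x + 1) (by omega),
      pvW_eq_of_le 'P' cs (lo := a + x) (hi := a + y + 1) (by omega),
      pvW_eq_of_le 'B' cs (lo := a + x) (hi := a + y + 1) (by omega)]

lemma pvTermB_zero_left (cs : List Char) (x y a : Int) (h : (a - x + 1).toNat ≤ (a - y).toNat) :
    pvTermB cs x y a = 0 := by
  unfold pvTermB
  rw [pvW_zero_of_le 'P' cs h, pvW_zero_of_le 'B' cs h]
  ring

lemma pvTermB_zero_right (cs : List Char) (x y a : Int) (h : (cs.length : Int) ≤ a + x) :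
    pvTermB cs x y a = 0 := by
  unfold pvTermB
  rw [pvW_zero_of_ge_len 'B' cs h, pvW_zero_of_ge_len 'P' cs h]
  ring

lemma pvTermA_lt (cs : List Char) (x y a : Int) (hyx : y < x) :
    pvTermA cs x y a =
      pvW 'P' cs (a - x + 1) (a - y) * pvW 'B' cs (a + y + 1) (a + x) +
      pvW 'B' cs (a - x + 1) (a - y) * pvW 'P' cs (a + y + 1) (a + x) := by
  unfold pvTermA
  rw [pvW_eq_of_le 'P' cs (lo := a - x + 1) (hi := a - y) (by omega),
      pvW_eq_of_le 'B' cs (lo := a - x + 1) (hi := a - y) (by omega),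
      pvW_eq_of_le 'P' cs (lo := a + y + 1) (hi := a + x) (by omega),
      pvW_eq_of_le 'B' cs (lo := a + y + 1) (hi := a + x) (by omega)]
  ring

theorem main_unchanged (s : String) (x y : Int) (hnD : ¬ D_artistic_photo_count s x y) :
    artistic_photo_count s x y = artistic_photo_count_alt s x y := by
  by_cases hn : s.toList = []
  · simp [artistic_photo_count, artistic_photo_count_alt, hn, PySem.List.enumerate_nil]
  · rw [A_eq s x y hn, B_eq s x y]
    refine congrArg _ (List.map_congr_left ?_)
    intro ac hac
    rw [PySem.List.mem_enumerate_iff] at hac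
    obtain ⟨k, hk, rfl⟩ := hac
    unfold pvQ
    dsimp only
    by_cases hA : s.toList[k] = 'A'
    · rw [if_pos hA]
      rcases (by omega : x ≤ y ∨ y < x) with hxy | hyx
      · -- x ≤ y : the terms agree; outside A's actor filter B's windows are empty
        by_cases hq : (s.toList[k] == 'A' && decide (x ≤ 0 + (k:Int)) &&
            decide (0 + (k:Int) ≤ PySem.List.len s.toList - 1 - x)) = true
        · rw [if_pos hq, pvTermB_eq_pvTermA _ _ _ _ hxy]
        · rw [if_neg hq]
          simp only [hA, beq_self_eq_true, Bool.true_and, Bool.and_eq_true,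
            decide_eq_true_eq, PySem.List.len_eq, not_and_or, not_le] at hq
          rcases hq with hq | hq
          · exact (pvTermB_zero_left s.toList x y _ (by omega)).symm
          · exact (pvTermB_zero_right s.toList x y _ (by omega)).symm
      · -- y < x : B's term is 0 and, as this input is outside D_, so is A's
        rw [pvTermB_zero_left s.toList x y _ (by omega)]
        by_cases hq : (s.toList[k] == 'A' && decide (x ≤ 0 + (k:Int)) &&
            decide (0 + (k:Int) ≤ PySem.List.len s.toList - 1 - x)) = true
        · rw [if_pos hq]
          simp only [hA, beq_self_eq_true, Bool.true_and, Bool.and_eq_true,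
            decide_eq_true_eq] at hq
          rw [D_iff] at hnD
          push Not at hnD
          have hnp := hnD hyx (0 + (k:Int), s.toList[k])
            (by rw [PySem.List.mem_enumerate_iff]; exact ⟨k, hk, rfl⟩) hA hq.1 hq.2
          dsimp only at hnp
          rw [pvTermA_lt s.toList x y _ hyx]
          have z1 : pvW 'P' s.toList ((0 + (k:Int)) - x + 1) ((0 + (k:Int)) - y) *
              pvW 'B' s.toList ((0 + (k:Int)) + y + 1) ((0 + (k:Int)) + x) = 0 := by
            by_cases hP : pvHas s.toList 'P' ((0 + (k:Int)) - x + 1) ((0 + (k:Int)) - y)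
            · rw [(pvW_eq_zero_iff _ _ _ _).mpr (hnp.1 hP), mul_zero]
            · rw [(pvW_eq_zero_iff _ _ _ _).mpr hP, zero_mul]
          have z2 : pvW 'B' s.toList ((0 + (k:Int)) - x + 1) ((0 + (k:Int)) - y) *
              pvW 'P' s.toList ((0 + (k:Int)) + y + 1) ((0 + (k:Int)) + x) = 0 := by
            by_cases hB : pvHas s.toList 'B' ((0 + (k:Int)) - x + 1) ((0 + (k:Int)) - y)
            · rw [(pvW_eq_zero_iff _ _ _ _).mpr (hnp.2 hB), mul_zero]
            · rw [(pvW_eq_zero_iff _ _ _ _).mpr hB, zero_mul]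
          rw [z1, z2, add_zero]
        · rw [if_neg hq]
    · rw [if_neg hA, if_neg (by simp [hA])]

lemma B_zero_of_lt (s : String) (x y : Int) (hyx : y < x) :
    artistic_photo_count_alt s x y = 0 := by
  rw [B_eq]
  apply List.sum_eq_zero
  intro v hv
  obtain ⟨ac, hac, rfl⟩ := List.mem_map.mp hv
  by_cases hA : ac.2 = 'A'
  · rw [if_pos hA]; exact pvTermB_zero_left _ _ _ _ (by omega)
  · rw [if_neg hA]

theorem main_tight (s : String) (x y : Int) (hD : D_artistic_photo_count s x y) :
    artistic_photo_count s x y ≠ artistic_photo_count_alt s x y := by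
  rw [D_iff] at hD
  obtain ⟨hyx, ac, hac, hA, hx1, hx2, hpair⟩ := hD
  rw [B_zero_of_lt s x y hyx]
  have hn : s.toList ≠ [] := by
    rw [PySem.List.mem_enumerate_iff] at hac
    obtain ⟨k, hk, _⟩ := hac
    intro h; rw [h] at hk; simp at hk
  rw [A_eq s x y hn]
  have hnonneg : ∀ v ∈ (PySem.List.enumerate s.toList 0).map (fun ac =>
      if pvQ x (PySem.List.len s.toList - 1) ac then pvTermA s.toList x y ac.1 else 0), 0 ≤ v := by
    intro v hv
    obtain ⟨ac', _, rfl⟩ := List.mem_map.mp hv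
    by_cases hq : pvQ x (PySem.List.len s.toList - 1) ac' = true
    · rw [if_pos hq, pvTermA_lt _ _ _ _ hyx]
      have n1 := pvW_nonneg 'P' s.toList (ac'.1 - x + 1) (ac'.1 - y)
      have n2 := pvW_nonneg 'B' s.toList (ac'.1 + y + 1) (ac'.1 + x)
      have n3 := pvW_nonneg 'B' s.toList (ac'.1 - x + 1) (ac'.1 - y)
      have n4 := pvW_nonneg 'P' s.toList (ac'.1 + y + 1) (ac'.1 + x)
      have := mul_nonneg n1 n2
      have := mul_nonneg n3 n4
      omega
    · rw [if_neg hq]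
  have hterm : 0 < (if pvQ x (PySem.List.len s.toList - 1) ac then pvTermA s.toList x y ac.1 else 0) := by
    have hx2' : ac.1 ≤ (s.length : Int) - 1 - x := by simpa using hx2
    rw [if_pos (by unfold pvQ; simp [hA, hx1, hx2'])]
    rw [pvTermA_lt _ _ _ _ hyx]
    rcases hpair with ⟨hP, hB⟩ | ⟨hB, hP⟩
    · have h1 := (pvW_pos_iff 'P' s.toList (ac.1 - x + 1) (ac.1 - y)).mpr hP
      have h2 := (pvW_pos_iff 'B' s.toList (ac.1 + y + 1) (ac.1 + x)).mpr hB
      have n3 := pvW_nonneg 'B' s.toList (ac.1 - x + 1) (ac.1 - y)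
      have n4 := pvW_nonneg 'P' s.toList (ac.1 + y + 1) (ac.1 + x)
      have := mul_pos h1 h2
      have := mul_nonneg n3 n4
      omega
    · have h1 := (pvW_pos_iff 'B' s.toList (ac.1 - x + 1) (ac.1 - y)).mpr hB
      have h2 := (pvW_pos_iff 'P' s.toList (ac.1 + y + 1) (ac.1 + x)).mpr hP
      have n3 := pvW_nonneg 'P' s.toList (ac.1 - x + 1) (ac.1 - y)
      have n4 := pvW_nonneg 'B' s.toList (ac.1 + y + 1) (ac.1 + x)
      have := mul_pos h1 h2
      have := mul_nonneg n3 n4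
      omega
  have hmem := List.mem_map_of_mem (f := fun ac =>
      if pvQ x (PySem.List.len s.toList - 1) ac then pvTermA s.toList x y ac.1 else 0) hac
  have hle := List.single_le_sum hnonneg _ hmem
  dsimp only at hle
  omega

-- ===== VERDICT (by name: the statement is the Claim_ definition above) =====
theorem artistic_photo_count_spec : Claim_unchanged_artistic_photo_count := by
  intro s x y _ hnD
  exact main_unchanged s x y hnD

theorem artistic_photo_count_changed : Claim_changed_artistic_photo_count := by
  unfold Claim_changed_artistic_photo_count; decide

theorem artistic_photo_count_tight : Claim_exact_artistic_photo_count := by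
  intro s x y _ hD
  exact main_tight s x y hD
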